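-- pv_equiv track=rewrite | github.com/pwalan/Algorithm | actual_problem/20181008toutiao01.py | beautifulNum
-- ===== SOURCE A (Python) =====
-- import itertools
--
-- def beautifulNum(a, b, k):
--     count = 0
--     permutations = list(itertools.product([int(a), int(b)], repeat=int(k)))
--     for permutation in permutations:
--         sum = 0
--         for i in permutation:
--             sum += i
--         isBeautiful = True
--         str_sum = str(sum)
--         for i in range(len(str_sum)):
--             if str_sum[i] != str(a) and str_sum[i] != str(b):
--                 isBeautiful = False
--                 break
--         if isBeautiful:
--             count += 1
--     return count
-- ===== SOURCE B (Python) =====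
-- def beautifulNum(a, b, k):
--     # Count j = number of positions holding a; weight by C(k, j) instead of
--     # enumerating all 2**k tuples.  Binomial maintained multiplicatively.
--     count = 0
--     c = 1  # C(k, j)
--     sa, sb = str(a), str(b)
--     for j in range(k + 1):
--         s = a * j + b * (k - j)
--         if all(ch == sa or ch == sb for ch in str(s)):
--             count += c
--         c = c * (k - j) // (j + 1)
--     return count
-- ===== Notes on version B (the rewrite author's own statement) =====
-- stated objective: faster
-- what changed: Instead of enumerating all 2^k tuples over {a,b} and summing each, B iterates over the count j of a's, computes the single sum a*j+b*(k-j), and weights it by the binomial coefficient C(k,j) maintained multiplicatively; intended as asymptotically faster (O(k^2) vs O(2^k*k)); measured 85x at the largest size both finished (k=16), A timed out beyond.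
import Mathlib
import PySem

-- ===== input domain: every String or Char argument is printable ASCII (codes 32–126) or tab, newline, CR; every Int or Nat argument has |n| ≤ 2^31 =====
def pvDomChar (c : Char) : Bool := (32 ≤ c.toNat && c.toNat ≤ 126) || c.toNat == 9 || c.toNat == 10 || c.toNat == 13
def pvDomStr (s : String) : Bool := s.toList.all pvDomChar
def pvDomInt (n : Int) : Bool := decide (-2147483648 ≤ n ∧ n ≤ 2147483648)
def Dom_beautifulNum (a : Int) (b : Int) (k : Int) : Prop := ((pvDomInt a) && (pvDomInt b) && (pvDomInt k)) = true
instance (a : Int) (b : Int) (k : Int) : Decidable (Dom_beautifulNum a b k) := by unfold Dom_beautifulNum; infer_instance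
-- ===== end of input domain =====

-- B replaces A's enumeration of all 2^k tuples over {a,b} by a single loop over the number j of a's,
-- weighting the sum a*j+b*(k-j) by C(k,j); intended as faster (measured 85x at the largest size both finished).


-- ===== PORT A =====
-- itertools.product([a, b], repeat=n): first coordinate varies slowest
def pvProdRep (vals : List Int) : Nat → List (List Int)
  | 0 => [[]]
  | n + 1 => vals.flatMap (fun v => (pvProdRep vals n).map (fun t => v :: t))

-- A's inner digit loop with its early break
def pvDigitLoopA (cs : List Char) (sa sb : String) : Bool :=
  match cs with
  | [] => true
  | c :: rest =>
    if String.mk [c] ≠ sa ∧ String.mk [c] ≠ sb then false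
    else pvDigitLoopA rest sa sb

def beautifulNum (a : Int) (b : Int) (k : Int) : Int :=
  let permutations := pvProdRep [a, b] k.toNat
  permutations.foldl (fun count permutation =>
    let sum := permutation.foldl (fun s i => s + i) 0
    let isBeautiful := pvDigitLoopA (PySem.Int.toStr sum).toList
                         (PySem.Int.toStr a) (PySem.Int.toStr b)
    if isBeautiful then count + 1 else count) 0

-- ===== PORT B =====
def pvBeautifulB (sa sb : String) (s : Int) : Bool :=
  (PySem.Int.toStr s).toList.all (fun ch => String.mk [ch] == sa || String.mk [ch] == sb)

def beautifulNum_alt (a : Int) (b : Int) (k : Int) : Int :=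
  let sa := PySem.Int.toStr a
  let sb := PySem.Int.toStr b
  ((PySem.List.pyRange 0 (k + 1) 1).foldl (fun (st : Int × Int) j =>
      let s := a * j + b * (k - j)
      let count := if pvBeautifulB sa sb s then st.1 + st.2 else st.1
      (count, PySem.Int.floordiv (st.2 * (k - j)) (j + 1))) (0, 1)).1

-- ===== PRECONDITION & SPEC =====
-- A raises ValueError for k < 0 (itertools.product with negative repeat)
def Pre_beautifulNum (a : Int) (b : Int) (k : Int) : Prop := 0 ≤ k
instance (a : Int) (b : Int) (k : Int) : Decidable (Pre_beautifulNum a b k) := by unfold Pre_beautifulNum; infer_instance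
def pvWitness_beautifulNum : Int × Int × Int := (1, 2, 3)

def Spec_beautifulNum (a : Int) (b : Int) (k : Int) (out : Int) : Prop := out = beautifulNum_alt a b k
instance (a : Int) (b : Int) (k : Int) (out : Int) : Decidable (Spec_beautifulNum a b k out) := by unfold Spec_beautifulNum; infer_instance

-- ===== CLAIM (what is proved, stated in full; the proofs are below) =====
def Claim_equal_beautifulNum : Prop := ∀ (a : Int) (b : Int) (k : Int), Dom_beautifulNum a b k → Pre_beautifulNum a b k → Spec_beautifulNum a b k (beautifulNum a b k)

-- ===== LEMMAS AND PROOFS =====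

-- the shared "beautiful" predicate, on the sum s
def pvP (a b s : Int) : Bool := pvBeautifulB (PySem.Int.toStr a) (PySem.Int.toStr b) s

-- A's break-loop computes List.all of the same test
theorem pvDigitLoopA_eq_all (cs : List Char) (sa sb : String) :
    pvDigitLoopA cs sa sb = cs.all (fun c => String.mk [c] == sa || String.mk [c] == sb) := by
  induction cs with
  | nil => rfl
  | cons c rest ih =>
    by_cases h1 : String.mk [c] = sa
    · simp [pvDigitLoopA, h1, ih]
    · by_cases h2 : String.mk [c] = sb
      · simp [pvDigitLoopA, h2, ih]
      · simp [pvDigitLoopA, h1, h2]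

-- foldl counting = countP
theorem foldl_count (q : List Int → Bool) (l : List (List Int)) (c : Int) :
    l.foldl (fun cnt t => if q t then cnt + 1 else cnt) c = c + (l.countP q : Int) := by
  induction l generalizing c with
  | nil => simp
  | cons t rest ih =>
    simp only [List.foldl_cons, List.countP_cons, ih]
    by_cases h : q t <;> simp [h] <;> ring

theorem foldl_add_shift (t : List Int) (x : Int) :
    t.foldl (fun s i => s + i) x = x + t.foldl (fun s i => s + i) 0 := by
  induction t generalizing x with
  | nil => simp
  | cons y rest ih =>
    simp only [List.foldl_cons]
    rw [ih (x + y), ih (0 + y)]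
    ring

-- Pascal shuffle for weighted sums
theorem pascal_sum (n : Nat) (g : Nat → Nat) :
    ∑ j ∈ Finset.range (n + 2), (n + 1).choose j * g j
      = (∑ j ∈ Finset.range (n + 1), n.choose j * g (j + 1))
        + ∑ j ∈ Finset.range (n + 1), n.choose j * g j := by
  rw [Finset.sum_range_succ' (fun j => (n + 1).choose j * g j) (n + 1)]
  have h1 : ∀ j, (n + 1).choose (j + 1) * g (j + 1)
      = n.choose j * g (j + 1) + n.choose (j + 1) * g (j + 1) := by
    intro j; rw [Nat.choose_succ_succ, Nat.add_mul]
  simp only [h1]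
  rw [Finset.sum_add_distrib]
  have h2 : (∑ j ∈ Finset.range (n + 1), n.choose (j + 1) * g (j + 1)) + (n + 1).choose 0 * g 0
      = ∑ j ∈ Finset.range (n + 2), n.choose j * g j := by
    rw [Finset.sum_range_succ' (fun j => n.choose j * g j) (n + 1)]
    simp
  have h3 : (∑ j ∈ Finset.range (n + 2), n.choose j * g j)
      = ∑ j ∈ Finset.range (n + 1), n.choose j * g j := by
    rw [Finset.sum_range_succ]
    simp [Nat.choose_succ_self]
  omega

-- the master count on A's side
theorem countP_prodRep (a b : Int) (n : Nat) (p : Int → Bool) :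
    (pvProdRep [a, b] n).countP (fun t => p (t.foldl (fun s i => s + i) 0))
      = ∑ j ∈ Finset.range (n + 1),
          n.choose j * (if p (a * j + b * ((n : Int) - j)) then 1 else 0) := by
  induction n generalizing p with
  | zero => simp [pvProdRep]
  | succ n ih =>
    have expand : pvProdRep [a, b] (n + 1)
        = ((pvProdRep [a, b] n).map (fun t => a :: t))
          ++ ((pvProdRep [a, b] n).map (fun t => b :: t)) := by
      simp [pvProdRep, List.flatMap]
    rw [expand, List.countP_append, List.countP_map, List.countP_map]
    have shift : ∀ (v : Int) (t : List Int),
        (v :: t).foldl (fun s i => s + i) 0 = v + t.foldl (fun s i => s + i) 0 := by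
      intro v t
      simp only [List.foldl_cons]
      rw [foldl_add_shift t (0 + v)]; ring
    have ca : ((pvProdRep [a, b] n).countP
          ((fun t => p (t.foldl (fun s i => s + i) 0)) ∘ (fun t => a :: t)))
        = (pvProdRep [a, b] n).countP (fun t => p (a + t.foldl (fun s i => s + i) 0)) := by
      apply List.countP_congr; intro t _; simp [Function.comp, shift a t]
    have cb : ((pvProdRep [a, b] n).countP
          ((fun t => p (t.foldl (fun s i => s + i) 0)) ∘ (fun t => b :: t)))
        = (pvProdRep [a, b] n).countP (fun t => p (b + t.foldl (fun s i => s + i) 0)) := by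
      apply List.countP_congr; intro t _; simp [Function.comp, shift b t]
    rw [ca, cb, ih (fun s => p (a + s)), ih (fun s => p (b + s))]
    have hA : (∑ j ∈ Finset.range (n + 1),
          n.choose j * (if p (a + (a * (j : Int) + b * ((n : Int) - j))) then 1 else 0))
        = ∑ j ∈ Finset.range (n + 1),
          n.choose j * (if p (a * ((j + 1 : Nat) : Int) + b * ((n : Int) + 1 - ((j + 1 : Nat) : Int))) then 1 else 0) := by
      apply Finset.sum_congr rfl; intro j _
      rw [show a + (a * (j : Int) + b * ((n : Int) - j))
            = a * ((j + 1 : Nat) : Int) + b * ((n : Int) + 1 - ((j + 1 : Nat) : Int)) from by push_cast; ring]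
    have hB : (∑ j ∈ Finset.range (n + 1),
          n.choose j * (if p (b + (a * (j : Int) + b * ((n : Int) - j))) then 1 else 0))
        = ∑ j ∈ Finset.range (n + 1),
          n.choose j * (if p (a * (j : Int) + b * ((n : Int) + 1 - (j : Int))) then 1 else 0) := by
      apply Finset.sum_congr rfl; intro j _
      rw [show b + (a * (j : Int) + b * ((n : Int) - j))
            = a * (j : Int) + b * ((n : Int) + 1 - (j : Int)) from by ring]
    have hT : (∑ j ∈ Finset.range (n + 1 + 1),
          (n + 1).choose j * (if p (a * (j : Int) + b * (((n + 1 : Nat) : Int) - j)) then 1 else 0))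
        = ∑ j ∈ Finset.range (n + 2),
          (n + 1).choose j * (if p (a * (j : Int) + b * ((n : Int) + 1 - (j : Int))) then 1 else 0) := by
      apply Finset.sum_congr (by norm_num); intro j _
      rw [show (((n + 1 : Nat) : Int) - (j : Int)) = ((n : Int) + 1 - (j : Int)) from by push_cast; ring]
    rw [hA, hB, hT,
      pascal_sum n (fun j => if p (a * (j : Int) + b * ((n : Int) + 1 - (j : Int))) then 1 else 0)]

-- characterize A
theorem beautifulNum_eq_sum (a b : Int) (n : Nat) :
    beautifulNum a b n
      = ((∑ j ∈ Finset.range (n + 1),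
          n.choose j * (if pvP a b (a * j + b * ((n : Int) - j)) then 1 else 0) : Nat) : Int) := by
  show (pvProdRep [a, b] ((n : Int)).toNat).foldl _ 0 = _
  simp only [Int.toNat_natCast]
  rw [foldl_count (fun t => pvDigitLoopA (PySem.Int.toStr (t.foldl (fun s i => s + i) 0)).toList
        (PySem.Int.toStr a) (PySem.Int.toStr b))]
  rw [show (0 : Int) + _ = _ from zero_add _]
  congr 1
  have : (fun (t : List Int) => pvDigitLoopA (PySem.Int.toStr (t.foldl (fun s i => s + i) 0)).toList
        (PySem.Int.toStr a) (PySem.Int.toStr b))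
      = fun t => pvP a b (t.foldl (fun s i => s + i) 0) := by
    funext t; rw [pvDigitLoopA_eq_all]; rfl
  rw [this, countP_prodRep]

-- binomial step: C(n,j)*(n-j) // (j+1) = C(n,j+1)   (j < n+1)
theorem choose_step (n j : Nat) (hj : j ≤ n) :
    PySem.Int.floordiv ((n.choose j : Int) * ((n : Int) - (j : Int))) ((j : Int) + 1)
      = (n.choose (j + 1) : Int) := by
  have hd : (n.choose j : Int) * ((n : Int) - (j : Int))
      = (n.choose (j + 1) : Int) * ((j : Int) + 1) := by
    have h2 : n.choose (j + 1) * (j + 1) = n.choose j * (n - j) := by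
      rw [Nat.choose_succ_right_eq]
    have hcast : ((n - j : Nat) : Int) = (n : Int) - (j : Int) := by
      omega
    calc (n.choose j : Int) * ((n : Int) - (j : Int))
        = ((n.choose j * (n - j) : Nat) : Int) := by rw [Nat.cast_mul, hcast]
      _ = ((n.choose (j + 1) * (j + 1) : Nat) : Int) := by rw [h2]
      _ = (n.choose (j + 1) : Int) * ((j : Int) + 1) := by push_cast; ring
  rw [hd, PySem.Int.floordiv_eq_ediv_of_pos (by omega)]
  exact Int.mul_ediv_cancel _ (by omega)

-- B's fold over the tail [j, …, n], with invariant c = C(n,j)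
-- B's fold over the tail [j, …, n], with invariant c = C(n,j)
theorem foldB_invariant (a b : Int) (n : Nat) :
    ∀ (m j : Nat), j + m = n + 1 → ∀ (cnt : Int),
    ((PySem.List.pyRange (j : Int) ((n : Int) + 1) 1).foldl (fun (st : Int × Int) i =>
        let s := a * i + b * ((n : Int) - i)
        let count := if pvP a b s then st.1 + st.2 else st.1
        (count, PySem.Int.floordiv (st.2 * ((n : Int) - i)) (i + 1)))
      (cnt, (n.choose j : Int))).1
      = cnt + ((∑ i ∈ Finset.Ico j (n + 1),
          n.choose i * (if pvP a b (a * (i : Int) + b * ((n : Int) - (i : Int))) then 1 else 0) : Nat) : Int) := by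
  intro m
  induction m with
  | zero =>
    intro j hj cnt
    rw [PySem.List.pyRange_one_eq_nil (by omega)]
    rw [show Finset.Ico j (n + 1) = ∅ from by rw [Finset.Ico_eq_empty_iff]; omega]
    simp
  | succ m ih =>
    intro j hj cnt
    rw [PySem.List.pyRange_one_cons (by exact_mod_cast by omega)]
    rw [List.foldl_cons]
    have hstep := choose_step n j (by omega)
    simp only [hstep]
    have hrec := ih (j + 1) (by omega)
      (if pvP a b (a * (j : Int) + b * ((n : Int) - (j : Int))) then cnt + (n.choose j : Int) else cnt)
    rw [show ((j : Int) + 1) = (((j + 1 : Nat) : Int)) from by push_cast; ring] at *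
    rw [hrec]
    rw [Finset.sum_eq_sum_Ico_succ_bot (show j < n + 1 by omega)
      (fun i => n.choose i * (if pvP a b (a * (i : Int) + b * ((n : Int) - (i : Int))) then 1 else 0))]
    by_cases hp : pvP a b (a * (j : Int) + b * ((n : Int) - (j : Int)))
    · simp only [hp, if_true]
      push_cast
      ring
    · simp only [hp, if_false, Bool.false_eq_true]
      push_cast
      ring

theorem beautifulNum_alt_eq_sum (a b : Int) (n : Nat) :
    beautifulNum_alt a b n
      = ((∑ j ∈ Finset.range (n + 1),
          n.choose j * (if pvP a b (a * j + b * ((n : Int) - j)) then 1 else 0) : Nat) : Int) := by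
  have h := foldB_invariant a b n (n + 1) 0 (by omega) 0
  rw [← Finset.range_eq_Ico] at h
  simp only [Nat.cast_zero, Nat.choose_zero_right, Nat.cast_one, zero_add] at h
  unfold beautifulNum_alt
  exact h

-- ===== VERDICT (by name: the statement is the Claim_ definition above) =====
theorem beautifulNum_spec : Claim_equal_beautifulNum := by
  intro a b k _ hk
  unfold Pre_beautifulNum at hk
  unfold Spec_beautifulNum
  obtain ⟨n, rfl⟩ : ∃ n : Nat, k = (n : Int) := ⟨k.toNat, by omega⟩
  rw [beautifulNum_eq_sum, beautifulNum_alt_eq_sum]
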